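-- pv_equiv track=rewrite | github.com/valerauday/OSLab | FCFS/Test.py | fcfs_disk_scheduling
-- ===== SOURCE A (Python) =====
-- def fcfs_disk_scheduling(initial_head, request_sequence):
--     total_seek_count = 0
--     track_path = [(initial_head, 1)]
--
--     current_head = initial_head
--     for idx, track in enumerate(request_sequence):
--         total_seek_count += abs(track - current_head)
--         current_head = track
--         track_path.append((track, idx + 2))
--
--     return total_seek_count, track_path
-- ===== SOURCE B (Python) =====
-- def fcfs_disk_scheduling(initial_head, request_sequence):
--     heads = [initial_head, *request_sequence]
--
--     # Divide and conquer: the total seek over a contiguous segment heads[lo:hi]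
--     # is the seek of each half plus the single crossing move at the split point.
--     def seek(lo, hi):
--         if hi - lo == 1:
--             return 0
--         mid = (lo + hi) // 2
--         return seek(lo, mid) + seek(mid, hi) + abs(heads[mid] - heads[mid - 1])
--
--     total_seek_count = seek(0, len(heads))
--     track_path = [(t, i + 1) for i, t in enumerate(heads)]
--     return total_seek_count, track_path
-- ===== Notes on version B (the rewrite author's own statement) =====
-- stated objective: alternative
-- what changed: Replaces A's single stateful left-to-right accumulator loop with a divide-and-conquer recursion over index segments: the total seek over heads[lo:hi] is computed as seek(left half) + seek(right half) + the crossing move |heads[mid]-heads[mid-1]|, and the path is built by an enumerate comprehension over the materialised heads list.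
import Mathlib
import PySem

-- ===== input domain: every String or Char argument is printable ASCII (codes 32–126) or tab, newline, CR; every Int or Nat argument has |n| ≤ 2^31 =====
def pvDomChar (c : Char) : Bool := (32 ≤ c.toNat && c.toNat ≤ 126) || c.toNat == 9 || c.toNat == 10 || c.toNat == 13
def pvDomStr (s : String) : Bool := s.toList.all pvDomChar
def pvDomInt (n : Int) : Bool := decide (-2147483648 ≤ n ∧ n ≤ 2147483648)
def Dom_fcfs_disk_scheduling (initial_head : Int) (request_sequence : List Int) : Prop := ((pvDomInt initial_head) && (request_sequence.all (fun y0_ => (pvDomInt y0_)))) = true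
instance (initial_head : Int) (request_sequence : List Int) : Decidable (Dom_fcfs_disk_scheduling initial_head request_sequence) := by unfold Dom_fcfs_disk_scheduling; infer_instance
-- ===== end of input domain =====

-- B computes the total seek count by divide-and-conquer over index segments instead of A's stateful accumulator loop (alternative decomposition; same cost).

-- ===== PORT A =====
-- stateful loop over enumerate(request_sequence): state = (total_seek_count, track_path, current_head)
def fcfs_disk_scheduling (initial_head : Int) (request_sequence : List Int) : Int × (List (Int × Int)) :=
  let st := (PySem.List.enumerate request_sequence 0).foldl
    (fun (s : Int × List (Int × Int) × Int) (p : Int × Int) =>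
      (s.1 + |p.2 - s.2.2|, s.2.1 ++ [(p.2, p.1 + 2)], p.2))
    (0, [(initial_head, 1)], initial_head)
  (st.1, st.2.1)

-- ===== PORT B =====
-- seek(lo, hi) of Source B: total seek over heads[lo:hi]; every reachable call has 1 ≤ hi - lo and
-- mid, mid-1 in range, so getD is exact there; the `hi - lo ≤ 1` guard only totalises the function
-- (Python would diverge on hi ≤ lo, which is never reached).
def fcfsSeek (heads : List Int) (lo hi : Nat) : Int :=
  if hi - lo ≤ 1 then 0
  else
    let mid := (lo + hi) / 2
    fcfsSeek heads lo mid + fcfsSeek heads mid hi + |heads.getD mid 0 - heads.getD (mid - 1) 0|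
termination_by hi - lo
decreasing_by all_goals omega

def fcfs_disk_scheduling_alt (initial_head : Int) (request_sequence : List Int) : Int × (List (Int × Int)) :=
  let heads := initial_head :: request_sequence
  let total_seek_count := fcfsSeek heads 0 heads.length
  let track_path := (PySem.List.enumerate heads 0).map (fun p => (p.2, p.1 + 1))
  (total_seek_count, track_path)

-- ===== PRECONDITION & SPEC =====
def Spec_fcfs_disk_scheduling (initial_head : Int) (request_sequence : List Int) (out : Int × (List (Int × Int))) : Prop := out = fcfs_disk_scheduling_alt initial_head request_sequence
instance (initial_head : Int) (request_sequence : List Int) (out : Int × (List (Int × Int))) : Decidable (Spec_fcfs_disk_scheduling initial_head request_sequence out) := by unfold Spec_fcfs_disk_scheduling; infer_instance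

-- ===== CLAIM (what is proved, stated in full; the proofs are below) =====
def Claim_equal_fcfs_disk_scheduling : Prop := ∀ (initial_head : Int) (request_sequence : List Int), Dom_fcfs_disk_scheduling initial_head request_sequence → Spec_fcfs_disk_scheduling initial_head request_sequence (fcfs_disk_scheduling initial_head request_sequence)

-- ===== LEMMAS AND PROOFS =====

-- the mathematical value both totals equal: sum of adjacent absolute differences over heads[lo:hi]
def segSum (heads : List Int) (lo hi : Nat) : Int :=
  ∑ i ∈ Finset.Ico (lo + 1) hi, |heads.getD i 0 - heads.getD (i - 1) 0|

-- B's divide-and-conquer computes segSum on every nonempty segment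
theorem fcfsSeek_eq_segSum (heads : List Int) : ∀ d lo hi, hi - lo = d → lo < hi →
    fcfsSeek heads lo hi = segSum heads lo hi := by
  intro d
  induction d using Nat.strong_induction_on with
  | _ d ih =>
    intro lo hi hd hlt
    rw [fcfsSeek]
    by_cases h1 : hi - lo ≤ 1
    · have : hi = lo + 1 := by omega
      simp [segSum, this]
    · have hmidlo : lo < (lo + hi) / 2 := by omega
      have hmidhi : (lo + hi) / 2 < hi := by omega
      simp only [h1, if_false]
      rw [ih ((lo + hi) / 2 - lo) (by omega) lo _ rfl hmidlo,
          ih (hi - (lo + hi) / 2) (by omega) _ hi rfl hmidhi]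
      unfold segSum
      rw [← Finset.sum_Ico_consecutive _ (by omega : lo + 1 ≤ (lo + hi) / 2) (by omega : (lo + hi) / 2 ≤ hi),
          Finset.sum_eq_sum_Ico_succ_bot (by omega : (lo + hi) / 2 < hi)]
      ring

-- the zip form of the pairwise seek sum equals segSum over the whole list
theorem zipsum_eq_segSum (heads : List Int) :
    ((heads.zip heads.tail).map (fun p => |p.2 - p.1|)).sum = segSum heads 0 heads.length := by
  have key : ∀ (xs : List Int),
      ((xs.zip xs.tail).map (fun p => |p.2 - p.1|)).sum
        = ∑ k ∈ Finset.range (xs.length - 1), |xs.getD (k + 1) 0 - xs.getD k 0| := by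
    intro xs
    induction xs with
    | nil => simp
    | cons a t iht =>
      cases t with
      | nil => simp
      | cons b u =>
        simp only [List.tail_cons] at iht ⊢
        simp only [List.zip_cons_cons, List.map_cons, List.sum_cons, iht]
        rw [show (a :: b :: u).length - 1 = ((b :: u).length - 1) + 1 by simp,
            Finset.sum_range_succ']
        rw [add_comm (∑ _i ∈ Finset.range ((b :: u).length - 1), _) _]
        congr 1
    -- reindex Ico (0+1) n as range (n-1)
  rw [key, segSum, Finset.sum_Ico_eq_sum_range]
  apply Finset.sum_congr rfl
  intro k _
  have h2 : 0 + 1 + k - 1 = k := by omega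
  have h1 : 0 + 1 + k = k + 1 := by omega
  rw [h2, h1]

-- invariant of A's fold: it adds the pairwise seek sum, appends the mapped tail, and tracks the last head
theorem loop_eq (rs : List Int) : ∀ (cur t : Int) (path : List (Int × Int)) (s : Int),
    (PySem.List.enumerate rs s).foldl
      (fun (st : Int × List (Int × Int) × Int) (p : Int × Int) =>
        (st.1 + |p.2 - st.2.2|, st.2.1 ++ [(p.2, p.1 + 2)], p.2))
      (t, path, cur)
    = (t + (((cur :: rs).zip rs).map (fun p => |p.2 - p.1|)).sum,
       path ++ (PySem.List.enumerate rs s).map (fun p => (p.2, p.1 + 2)),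
       rs.getLastD cur) := by
  induction rs with
  | nil => intro cur t path s; simp [PySem.List.enumerate_nil]
  | cons x xs ih =>
      intro cur t path s
      simp only [PySem.List.enumerate_cons, List.foldl_cons, ih]
      simp [List.zip_cons_cons, List.append_assoc, add_assoc]
      cases xs with
      | nil => simp
      | cons y ys =>
          cases h : (y :: ys).getLast? with
          | none => simp [List.getLast?_eq_none_iff] at h
          | some z => simp [h]

-- shifting the enumerate start by one while lowering the index offset gives the same mapped path
theorem enum_shift (rs : List Int) : ∀ (s : Int),
    (PySem.List.enumerate rs s).map (fun p => (p.2, p.1 + 2))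
      = (PySem.List.enumerate rs (s + 1)).map (fun p => (p.2, p.1 + 1)) := by
  induction rs with
  | nil => intro s; simp [PySem.List.enumerate_nil]
  | cons x xs ih =>
      intro s
      simp only [PySem.List.enumerate_cons, List.map_cons, ih (s + 1)]
      ring_nf

theorem fcfs_main (initial_head : Int) (request_sequence : List Int) :
    fcfs_disk_scheduling initial_head request_sequence
      = fcfs_disk_scheduling_alt initial_head request_sequence := by
  simp only [fcfs_disk_scheduling, fcfs_disk_scheduling_alt, loop_eq]
  apply Prod.ext
  · have hz := zipsum_eq_segSum (initial_head :: request_sequence)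
    have hs := fcfsSeek_eq_segSum (initial_head :: request_sequence)
      ((initial_head :: request_sequence).length) 0 ((initial_head :: request_sequence).length)
      (by simp) (by simp)
    simp only [List.tail_cons] at hz
    simp only [List.length_cons] at hz hs ⊢
    rw [hs, ← hz]
    ring
  · simp only [PySem.List.enumerate_cons, List.map_cons]
    simpa using enum_shift request_sequence 0

-- ===== VERDICT (by name: the statement is the Claim_ definition above) =====
theorem fcfs_disk_scheduling_spec : Claim_equal_fcfs_disk_scheduling := by
  intro ih rs _
  exact fcfs_main ih rs
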